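-- pv_equiv track=rewrite | github.com/ShauriyaDeveloper1/AI-Powered-Interview-Coach | app.py | _normalize_thread_turns
-- ===== SOURCE A (Python) =====
-- def _normalize_thread_turns(raw_turns):
--     if not isinstance(raw_turns, list):
--         return []
--
--     normalized = []
--     for item in raw_turns:
--         if not isinstance(item, dict):
--             continue
--         q = (item.get("question") or "").strip()
--         a = (item.get("answer") or item.get("transcription") or "").strip()
--         if not q or not a:
--             continue
--         normalized.append({"question": q, "answer": a})
--
--     # Keep prompts compact.
--     return normalized[-8:]
-- ===== SOURCE B (Python) =====
-- def _extract_turn(item):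
--     """Validate one raw turn; return the normalized dict or None."""
--     if not isinstance(item, dict):
--         return None
--     q = (item.get("question") or "").strip()
--     a = (item.get("answer") or item.get("transcription") or "").strip()
--     if not q or not a:
--         return None
--     return {"question": q, "answer": a}
--
--
-- def _normalize_thread_turns(raw_turns):
--     if not isinstance(raw_turns, list):
--         return []
--     acc = []
--     for item in reversed(raw_turns):
--         turn = _extract_turn(item)
--         if turn is None:
--             continue
--         acc.append(turn)
--         if len(acc) == 8:
--             break
--     acc.reverse()
--     return acc
-- ===== Notes on version B (the rewrite author's own statement) =====
-- stated objective: alternative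
-- what changed: B walks raw_turns in reverse with a factored-out per-item validator, stops as soon as 8 valid turns are collected, and reverses the accumulator, instead of A's forward pass building the full normalized list and slicing [-8:].
import Mathlib
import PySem

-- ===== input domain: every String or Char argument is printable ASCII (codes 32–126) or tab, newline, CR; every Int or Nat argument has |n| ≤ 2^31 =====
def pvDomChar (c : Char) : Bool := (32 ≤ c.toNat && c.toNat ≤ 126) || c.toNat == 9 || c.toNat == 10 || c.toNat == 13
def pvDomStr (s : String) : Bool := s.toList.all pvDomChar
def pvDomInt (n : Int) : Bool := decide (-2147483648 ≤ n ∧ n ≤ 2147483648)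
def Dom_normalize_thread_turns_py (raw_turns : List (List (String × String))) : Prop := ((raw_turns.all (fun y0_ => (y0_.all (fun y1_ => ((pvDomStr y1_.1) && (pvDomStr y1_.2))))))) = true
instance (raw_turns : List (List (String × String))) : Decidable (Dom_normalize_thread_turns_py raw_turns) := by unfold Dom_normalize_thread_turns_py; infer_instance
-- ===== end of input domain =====

-- One honest line: B walks the list in reverse with a factored-out per-item validator and stops
-- after collecting 8 valid turns, then reverses; A builds the whole normalized list and slices [-8:].

-- ===== PORT A =====
-- Forward pass: append each validated turn to `normalized`, then return normalized[-8:].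
def normalize_thread_turns_py (raw_turns : List (List (String × String))) : List (List (String × String)) :=
  let normalized := raw_turns.foldl (fun acc item =>
    let q := PySem.Str.strip (PySem.Dict.getD (PySem.Dict.mk item) "question" "")
    -- `item.get("answer") or item.get("transcription") or ""`: None and "" are both falsy,
    -- so getD with default "" is exact here.
    let a0 := PySem.Dict.getD (PySem.Dict.mk item) "answer" ""
    let a := PySem.Str.strip (if a0 = "" then PySem.Dict.getD (PySem.Dict.mk item) "transcription" "" else a0)
    if q = "" ∨ a = "" then acc
    else acc ++ [[("question", q), ("answer", a)]]) []
  PySem.List.slice normalized (some (-8)) none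

-- ===== PORT B =====
-- B-side helper: validate one raw turn (returns none where Source B's _extract_turn returns None).
def pvExtractTurn (item : List (String × String)) : Option (List (String × String)) :=
  let q := PySem.Str.strip (PySem.Dict.getD (PySem.Dict.mk item) "question" "")
  let a0 := PySem.Dict.getD (PySem.Dict.mk item) "answer" ""
  let a := PySem.Str.strip (if a0 = "" then PySem.Dict.getD (PySem.Dict.mk item) "transcription" "" else a0)
  if q = "" ∨ a = "" then none
  else some [("question", q), ("answer", a)]

-- B-side helper: the reversed-order loop with early break at 8 collected turns.
def pvCollect : List (List (String × String)) → List (List (String × String)) → List (List (String × String))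
  | [], acc => acc
  | item :: rest, acc =>
    match pvExtractTurn item with
    | none => pvCollect rest acc
    | some t =>
      let acc' := acc ++ [t]
      if acc'.length = 8 then acc' else pvCollect rest acc'

def normalize_thread_turns_py_alt (raw_turns : List (List (String × String))) : List (List (String × String)) :=
  (pvCollect raw_turns.reverse []).reverse

-- ===== PRECONDITION & SPEC =====
def Spec_normalize_thread_turns_py (raw_turns : List (List (String × String))) (out : List (List (String × String))) : Prop := out = normalize_thread_turns_py_alt raw_turns
instance (raw_turns : List (List (String × String))) (out : List (List (String × String))) : Decidable (Spec_normalize_thread_turns_py raw_turns out) := by unfold Spec_normalize_thread_turns_py; infer_instance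

-- ===== CLAIM (what is proved, stated in full; the proofs are below) =====
def Claim_equal_normalize_thread_turns_py : Prop := ∀ (raw_turns : List (List (String × String))), Dom_normalize_thread_turns_py raw_turns → Spec_normalize_thread_turns_py raw_turns (normalize_thread_turns_py raw_turns)

-- ===== LEMMAS AND PROOFS =====

-- A's foldl is filterMap by the (shared per-item) validation.
lemma foldl_opt {α β : Type} (f : α → Option β) (l : List α) (acc : List β) :
    l.foldl (fun acc x => match f x with | none => acc | some t => acc ++ [t]) acc
      = acc ++ l.filterMap f := by
  induction l generalizing acc with
  | nil => simp
  | cons x xs ih =>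
    cases hx : f x <;> simp [hx, ih]

lemma foldl_eq_filterMap (l : List (List (String × String))) (acc : List (List (String × String))) :
    l.foldl (fun acc item =>
      let q := PySem.Str.strip (PySem.Dict.getD (PySem.Dict.mk item) "question" "")
      let a0 := PySem.Dict.getD (PySem.Dict.mk item) "answer" ""
      let a := PySem.Str.strip (if a0 = "" then PySem.Dict.getD (PySem.Dict.mk item) "transcription" "" else a0)
      if q = "" ∨ a = "" then acc
      else acc ++ [[("question", q), ("answer", a)]]) acc
    = acc ++ l.filterMap pvExtractTurn := by
  rw [← foldl_opt pvExtractTurn l acc]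
  congr 1
  funext acc item
  simp only [pvExtractTurn]
  split <;> split <;> rfl

-- B's loop collects (up to) the first 8 validated turns after the cursor.
lemma pvCollect_eq (l : List (List (String × String))) (acc : List (List (String × String)))
    (h : acc.length < 8) :
    pvCollect l acc = acc ++ (l.filterMap pvExtractTurn).take (8 - acc.length) := by
  induction l generalizing acc with
  | nil => simp [pvCollect]
  | cons x xs ih =>
    simp only [pvCollect, List.filterMap_cons]
    cases hx : pvExtractTurn x with
    | none => exact ih acc h
    | some t =>
      simp only []
      by_cases h8 : (acc ++ [t]).length = 8
      · simp only [if_pos h8]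
        have : 8 - acc.length = 1 := by simp at h8; omega
        simp [this]
      · simp only [if_neg h8]
        have hlt : (acc ++ [t]).length < 8 := by simp at h8 ⊢; omega
        rw [ih _ hlt]
        have : 8 - acc.length = (8 - (acc ++ [t]).length) + 1 := by simp; omega
        simp [this, List.take_succ_cons]

-- ===== VERDICT (by name: the statement is the Claim_ definition above) =====
theorem normalize_thread_turns_py_spec : Claim_equal_normalize_thread_turns_py := by
  intro raw_turns _
  show normalize_thread_turns_py raw_turns = normalize_thread_turns_py_alt raw_turns
  unfold normalize_thread_turns_py normalize_thread_turns_py_alt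
  rw [foldl_eq_filterMap, pvCollect_eq _ _ (by simp)]
  simp only [List.nil_append, List.length_nil, Nat.sub_zero, List.filterMap_reverse]
  set m := raw_turns.filterMap pvExtractTurn with hm
  rw [PySem.List.slice_from_neg_ofNat m 8 (by omega)]
  rw [List.take_reverse, List.reverse_reverse]
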